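-- pv_equiv track=rewrite | github.com/cirosantilli/project-euler-solutions | solvers/857.py | G_exact
-- ===== SOURCE A (Python) =====
-- def G_exact(n: int, a) -> int:
--     """Exact integer G(n) for small n (used for asserts)."""
--     fact = [1] * (n + 1)
--     for i in range(2, n + 1):
--         fact[i] = fact[i - 1] * i
--
--     def comb(nn: int, kk: int) -> int:
--         return fact[nn] // (fact[kk] * fact[nn - kk])
--
--     g = [0] * (n + 1)
--     g[0] = 1
--     for m in range(1, n + 1):
--         total = 0
--         upto = 5 if m >= 5 else m
--         for s in range(1, upto + 1):
--             total += comb(m, s) * a[s] * g[m - s]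
--         g[m] = total
--     return g[n]
-- ===== SOURCE B (Python) =====
-- def G_exact(n: int, a) -> int:
--     """Exact integer G(n) via a constant-coefficient recurrence: the EGF scaling
--     p[m] = 120**m * g[m] / m! turns the binomial recurrence into an order-5
--     linear recurrence with constant integer weights w[s] = a[s] * 120**s // s!,
--     so no binomial coefficients are needed; one exact division recovers g[n]."""
--     SC = [120, 7200, 288000, 8640000, 207360000]  # 120**s // s! for s = 1..5
--     k = 5 if n >= 5 else n
--     w = [a[s] * SC[s - 1] for s in range(1, k + 1)]
--     p = [1]
--     for m in range(1, n + 1):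
--         upto = 5 if m >= 5 else m
--         total = 0
--         for s in range(1, upto + 1):
--             total += w[s - 1] * p[m - s]
--         p.append(total)
--     f = 1
--     for i in range(2, n + 1):
--         f *= i
--     return (f * p[n]) // 120 ** n
-- ===== Notes on version B (the rewrite author's own statement) =====
-- stated objective: alternative
-- what changed: Replaced the binomial-coefficient DP (factorial table + comb inside a double loop) by the EGF scaling p[m] = 120**m*g[m]/m!, which turns the recurrence into an order-5 CONSTANT-coefficient linear recurrence with integer weights a[s]*120**s//s!; g[n] is recovered by one exact division n!*p[n]//120**n, so no binomial coefficients are computed at all.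
import Mathlib
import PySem

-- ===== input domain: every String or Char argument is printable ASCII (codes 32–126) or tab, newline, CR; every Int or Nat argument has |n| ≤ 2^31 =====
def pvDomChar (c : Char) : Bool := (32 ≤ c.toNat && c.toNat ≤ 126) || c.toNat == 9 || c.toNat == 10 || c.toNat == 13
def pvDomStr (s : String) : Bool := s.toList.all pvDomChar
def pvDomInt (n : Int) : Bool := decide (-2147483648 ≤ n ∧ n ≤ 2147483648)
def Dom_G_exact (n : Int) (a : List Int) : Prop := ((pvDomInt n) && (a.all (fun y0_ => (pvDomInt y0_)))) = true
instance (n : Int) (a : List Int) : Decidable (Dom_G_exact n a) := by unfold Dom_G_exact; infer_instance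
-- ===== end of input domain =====

-- B replaces A's binomial-coefficient DP by the scaled constant-coefficient recurrence
-- p[m] = 120^m*g[m]/m! (integer weights a[s]*120^s/s!), recovering g[n] by one exact division.

-- ===== PORT A =====
-- fact = [1]*(n+1); for i in range(2, n+1): fact[i] = fact[i-1]*i
def factA (n : Int) : List Int :=
  (PySem.List.pyRange 2 (n+1) 1).foldl
    (fun f i => PySem.List.pySetD f i (PySem.List.pyGetD f (i-1) 1 * i))
    (List.replicate (n+1).toNat 1)

-- comb(nn, kk) = fact[nn] // (fact[kk] * fact[nn - kk])
def combA (fact : List Int) (nn kk : Int) : Int :=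
  PySem.Int.floordiv (PySem.List.pyGetD fact nn 1)
    (PySem.List.pyGetD fact kk 1 * PySem.List.pyGetD fact (nn - kk) 1)

-- one iteration of the 'for m in range(1, n+1)' loop (body over the g array)
def gStepA (fact : List Int) (a : List Int) (g : List Int) (m : Int) : List Int :=
  let upto : Int := if m ≥ 5 then 5 else m
  let total := (PySem.List.pyRange 1 (upto+1) 1).foldl
    (fun total s =>
      total + combA fact m s * PySem.List.pyGetD a s 0 * PySem.List.pyGetD g (m - s) 0) 0
  PySem.List.pySetD g m total

def G_exact (n : Int) (a : List Int) : Int :=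
  let fact := factA n
  let g0 := PySem.List.pySetD (List.replicate (n+1).toNat 0) 0 1
  let g := (PySem.List.pyRange 1 (n+1) 1).foldl (gStepA fact a) g0
  PySem.List.pyGetD g n 0

-- ===== PORT B =====
def scB : List Int := [120, 7200, 288000, 8640000, 207360000]

-- one iteration of B's 'for m in range(1, n+1)' loop: append the next p value
def pStepB (w : List Int) (p : List Int) (m : Int) : List Int :=
  let upto : Int := if m ≥ 5 then 5 else m
  let total := (PySem.List.pyRange 1 (upto+1) 1).foldl
    (fun t s => t + PySem.List.pyGetD w (s-1) 0 * PySem.List.pyGetD p (m - s) 0) 0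
  p ++ [total]

def G_exact_alt (n : Int) (a : List Int) : Int :=
  let k : Int := if n ≥ 5 then 5 else n
  let w := (PySem.List.pyRange 1 (k+1) 1).map
    (fun s => PySem.List.pyGetD a s 0 * PySem.List.pyGetD scB (s-1) 0)
  let p := (PySem.List.pyRange 1 (n+1) 1).foldl (pStepB w) [1]
  let f := (PySem.List.pyRange 2 (n+1) 1).foldl (fun f i => f * i) 1
  -- '120 ** n': exact for the n ≥ 0 admitted by Pre_
  PySem.Int.floordiv (f * PySem.List.pyGetD p n 0) (120 ^ n.toNat)

-- ===== PRECONDITION & SPEC =====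
-- Pre excludes the inputs where Python A raises IndexError: n < 0 (g[0]=1 on an
-- empty list) and a too short for the a[s] reads with 1 ≤ s ≤ min(n,5).
def Pre_G_exact (n : Int) (a : List Int) : Prop :=
  0 ≤ n ∧ (n = 0 ∨ min n 5 < (a.length : Int))
instance (n : Int) (a : List Int) : Decidable (Pre_G_exact n a) := by
  unfold Pre_G_exact; infer_instance

def pvWitness_G_exact : Int × List Int := (3, [0, 1, 1, 2])

def Spec_G_exact (n : Int) (a : List Int) (out : Int) : Prop := out = G_exact_alt n a
instance (n : Int) (a : List Int) (out : Int) : Decidable (Spec_G_exact n a out) := by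
  unfold Spec_G_exact; infer_instance

-- ===== CLAIM (what is proved, stated in full; the proofs are below) =====
def Claim_equal_G_exact : Prop :=
  ∀ (n : Int) (a : List Int), Dom_G_exact n a → Pre_G_exact n a →
    Spec_G_exact n a (G_exact n a)

-- ===== LEMMAS AND PROOFS =====

-- the common recurrence: gS a m = G(m), with a read exactly as both ports read it
def gS (a : List Int) : Nat → Int
  | 0 => 1
  | (m+1) =>
    ((List.range (min (m+1) 5)).map (fun j =>
      ((Nat.choose (m+1) (j+1) : Nat) : Int)
        * PySem.List.pyGetD a ((j : Int)+1) 0 * gS a (m - j))).sum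
termination_by m => m
decreasing_by omega

theorem gS_succ (a : List Int) (m : Nat) :
    gS a (m+1) =
      ((List.range (min (m+1) 5)).map (fun j =>
        ((Nat.choose (m+1) (j+1) : Nat) : Int)
          * PySem.List.pyGetD a ((j : Int)+1) 0 * gS a (m - j))).sum := by
  rw [gS]

theorem factA_aux (N : Nat) : ∀ (tail : List Int),
    (PySem.List.pyRange 2 ((N:Int)+1) 1).foldl
      (fun f i => PySem.List.pySetD f i (PySem.List.pyGetD f (i-1) 1 * i))
      (List.replicate (N+1) 1 ++ tail)
      = (List.range (N+1)).map (fun i => ((Nat.factorial i : Nat) : Int)) ++ tail := by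
  induction N with
  | zero => intro tail; rw [PySem.List.pyRange_one_eq_nil (by omega)]; simp [Nat.factorial]
  | succ M ih =>
    intro tail
    rcases Nat.eq_zero_or_pos M with h | h
    · subst h
      rw [show ((0:Nat)+1 : Nat) = 1 from rfl]
      rw [PySem.List.pyRange_one_eq_nil (by norm_num)]
      simp [List.range_succ, Nat.factorial]
    · have hsplit : PySem.List.pyRange 2 (((M+1 : Nat) : Int)+1) 1
          = PySem.List.pyRange 2 ((M:Int)+1) 1 ++ [(M:Int)+1] := by
        push_cast
        exact PySem.List.pyRange_one_succ_right (by omega)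
      have hrep : List.replicate (M+1+1) 1 ++ tail = List.replicate (M+1) (1:Int) ++ (1 :: tail) := by
        rw [List.replicate_succ']; simp
      rw [hsplit, hrep, List.foldl_append, ih (1 :: tail)]
      show PySem.List.pySetD _ _ _ = _
      have hlen : ((List.range (M+1)).map (fun i => ((Nat.factorial i : Nat) : Int))).length = M+1 := by simp
      have h1 : (M:Int)+1-1 = ((M:Nat) : Int) := by ring
      rw [h1, PySem.List.pyGetD_natCast]
      have hget : ((List.range (M+1)).map (fun i => ((Nat.factorial i : Nat) : Int)) ++ 1 :: tail).getD M 1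
          = ((Nat.factorial M : Nat) : Int) := by
        rw [List.getD_eq_getElem?_getD, List.getElem?_append_left (by simp)]
        simp
      rw [hget]
      rw [show (M:Int)+1 = ((M+1 : Nat) : Int) by push_cast; ring, PySem.List.pySetD_natCast]
      rw [List.set_append_right _ _ (by omega), hlen]
      simp [List.range_succ, Nat.factorial_succ]
      ring

theorem factA_eq (N : Nat) :
    factA (N : Int) = (List.range (N+1)).map (fun i => ((Nat.factorial i : Nat) : Int)) := by
  have h := factA_aux N []
  simp only [List.append_nil] at h
  unfold factA
  rw [show ((N:Int)+1).toNat = N+1 by omega]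
  exact h

theorem combA_eq (N m s : Nat) (hm : m ≤ N) (hs : s ≤ m) :
    combA (factA (N : Int)) (m : Int) (s : Int) = ((Nat.choose m s : Nat) : Int) := by
  rw [factA_eq]
  unfold combA
  have key : ∀ (i : Nat), i ≤ N →
      PySem.List.pyGetD ((List.range (N+1)).map (fun i => ((Nat.factorial i : Nat) : Int))) (i:Int) 1
        = ((Nat.factorial i : Nat) : Int) := by
    intro i hi
    rw [PySem.List.pyGetD_natCast, List.getD_eq_getElem?_getD]
    simp [Nat.lt_succ_of_le hi]
  rw [show (m:Int) - (s:Int) = ((m - s : Nat) : Int) by omega]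
  rw [key m hm, key s (le_trans hs hm), key (m-s) (by omega)]
  rw [show ((Nat.factorial s : Nat):Int) * ((Nat.factorial (m-s) : Nat):Int)
        = ((Nat.factorial s * Nat.factorial (m-s) : Nat) : Int) by push_cast; ring]
  rw [PySem.Int.floordiv_natCast, ← Nat.choose_eq_factorial_div_factorial hs]

-- sum shape of a 'for s in range(1, u+1): total += f(s)' loop
theorem foldl_pyRange_add (u : Nat) (f : Int → Int) :
    (PySem.List.pyRange 1 ((u : Int)+1) 1).foldl (fun t s => t + f s) 0
      = ((List.range u).map (fun (j : Nat) => f ((j : Int)+1))).sum := by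
  rw [PySem.List.pyRange_one]
  rw [show ((u:Int)+1-1).toNat = u by omega]
  rw [List.foldl_map, PySem.List.foldl_add, zero_add]
  exact congrArg List.sum (List.map_congr_left (fun a _ => by rw [add_comm]))

def gListA (a : List Int) (N k : Nat) : List Int :=
  (List.range (N+1)).map (fun i => if i ≤ k then gS a i else 0)

theorem gListA_get (a : List Int) (N k i : Nat) (hi : i ≤ N) :
    PySem.List.pyGetD (gListA a N k) (i : Int) 0 = if i ≤ k then gS a i else 0 := by
  unfold gListA
  rw [PySem.List.pyGetD_natCast, List.getD_eq_getElem?_getD]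
  simp [Nat.lt_succ_of_le hi]

theorem outerA (N : Nat) (a : List Int) :
    ∀ (k : Nat), k ≤ N →
      (PySem.List.pyRange 1 ((k : Int)+1) 1).foldl (gStepA (factA (N : Int)) a)
          (PySem.List.pySetD (List.replicate (N+1) 0) 0 1)
        = gListA a N k := by
  intro k
  induction k with
  | zero =>
    intro _
    rw [PySem.List.pyRange_one_eq_nil (by omega)]
    simp only [List.foldl_nil]
    rw [show (0:Int) = ((0:Nat):Int) from rfl, PySem.List.pySetD_natCast]
    unfold gListA
    apply List.ext_getElem (by simp)
    intro i h1 h2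
    by_cases hi : i = 0
    · subst hi; simp [gS]
    · simp at h1
      simp [List.getElem_replicate, Ne.symm hi, hi]
  | succ k ih =>
    intro hk1
    have hk : k ≤ N := by omega
    have hsplit : PySem.List.pyRange 1 (((k+1:Nat):Int)+1) 1
        = PySem.List.pyRange 1 ((k:Int)+1) 1 ++ [(k:Int)+1] := by
      push_cast; exact PySem.List.pyRange_one_succ_right (by omega)
    rw [hsplit, List.foldl_append, ih hk, List.foldl_cons, List.foldl_nil]
    simp only [gStepA]
    have hupto : (if ((k:Int)+1) ≥ 5 then (5:Int) else (k:Int)+1) = ((min (k+1) 5 : Nat) : Int) := by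
      split_ifs with h <;> push_cast <;> omega
    rw [hupto]
    rw [foldl_pyRange_add (min (k+1) 5)
      (fun s => combA (factA (N : Int)) ((k:Int)+1) s * PySem.List.pyGetD a s 0
        * PySem.List.pyGetD (gListA a N k) ((k:Int)+1 - s) 0)]
    have hterm : ((List.range (min (k+1) 5)).map (fun (j : Nat) =>
          combA (factA (N : Int)) ((k:Int)+1) ((j:Int)+1) * PySem.List.pyGetD a ((j:Int)+1) 0
            * PySem.List.pyGetD (gListA a N k) ((k:Int)+1 - ((j:Int)+1)) 0))
        = ((List.range (min (k+1) 5)).map (fun (j : Nat) =>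
          ((Nat.choose (k+1) (j+1) : Nat) : Int) * PySem.List.pyGetD a ((j:Int)+1) 0
            * gS a (k - j))) := by
      apply List.map_congr_left
      intro j hj
      rw [List.mem_range] at hj
      have hj5 : j < 5 := lt_of_lt_of_le hj (by omega)
      have hjk : j < k+1 := lt_of_lt_of_le hj (by omega)
      have e1 : ((k:Int)+1) = (((k+1:Nat)):Int) := by push_cast; ring
      have e2 : ((j:Int)+1) = (((j+1:Nat)):Int) := by push_cast; ring
      rw [e1, e2, combA_eq N (k+1) (j+1) (by omega) (by omega)]
      rw [show (((k+1:Nat)):Int) - (((j+1:Nat)):Int) = ((k-j : Nat) : Int) by omega]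
      rw [gListA_get a N k (k-j) (by omega)]
      rw [if_pos (by omega)]
    rw [hterm, ← gS_succ a k]
    rw [show ((k:Int)+1) = (((k+1:Nat)):Int) by push_cast; ring, PySem.List.pySetD_natCast]
    unfold gListA
    apply List.ext_getElem (by simp)
    intro i h1 h2
    simp only [List.length_set, List.length_map, List.length_range] at h1
    by_cases hi : i = k+1
    · subst hi
      rw [List.getElem_set_self (by simpa using h1)]
      simp
    · rw [List.getElem_set_ne (by omega)]
      simp only [List.getElem_map, List.getElem_range]
      have : (i ≤ k) = (i ≤ k+1) := by
        apply propext; constructor <;> intro <;> omega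
      split_ifs with ha hb hb <;> first | rfl | omega

-- ---------- B side ----------

-- the constant weight w[s] = a[s] * 120^s / s!  (j = s-1)
def wgtB (a : List Int) (j : Nat) : Int :=
  PySem.List.pyGetD a ((j : Int)+1) 0 * PySem.List.pyGetD scB (j : Int) 0

-- B's scaled sequence p[m]
def pS (a : List Int) : Nat → Int
  | 0 => 1
  | (m+1) =>
    ((List.range (min (m+1) 5)).map (fun j => wgtB a j * pS a (m - j))).sum
termination_by m => m
decreasing_by omega

theorem pS_succ (a : List Int) (m : Nat) :
    pS a (m+1) =
      ((List.range (min (m+1) 5)).map (fun j => wgtB a j * pS a (m - j))).sum := by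
  rw [pS]

theorem scB_fact (j : Nat) (h : j < 5) :
    PySem.List.pyGetD scB (j : Int) 0 * ((Nat.factorial (j+1) : Nat) : Int)
      = 120 ^ (j+1) := by
  interval_cases j <;> decide

-- the scaling identity: m! * p[m] = 120^m * g[m]
theorem pS_fact (a : List Int) : ∀ (m : Nat),
    ((Nat.factorial m : Nat) : Int) * pS a m = 120 ^ m * gS a m := by
  intro m
  induction m using Nat.strong_induction_on with
  | _ m ih =>
    match m with
    | 0 => simp [pS, gS]
    | (m+1) =>
      rw [pS_succ, gS_succ, ← List.sum_map_mul_left, ← List.sum_map_mul_left]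
      apply congrArg List.sum
      apply List.map_congr_left
      intro j hj
      rw [List.mem_range] at hj
      have hj5 : j < 5 := lt_of_lt_of_le hj (by omega)
      have hjm : j + 1 ≤ m + 1 := by omega
      have hfac : (Nat.factorial (m+1) : Int)
          = ((Nat.choose (m+1) (j+1) : Nat) : Int)
            * ((Nat.factorial (j+1) : Nat) : Int) * ((Nat.factorial (m-j) : Nat) : Int) := by
        have := Nat.choose_mul_factorial_mul_factorial hjm
        rw [show m + 1 - (j+1) = m - j from by omega] at this
        exact_mod_cast this.symm
      calc ((Nat.factorial (m+1) : Nat) : Int) * (wgtB a j * pS a (m-j))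
          = wgtB a j * (((Nat.choose (m+1) (j+1) : Nat) : Int)
              * ((Nat.factorial (j+1) : Nat) : Int))
              * (((Nat.factorial (m-j) : Nat) : Int) * pS a (m-j)) := by rw [hfac]; ring
        _ = wgtB a j * (((Nat.choose (m+1) (j+1) : Nat) : Int)
              * ((Nat.factorial (j+1) : Nat) : Int))
              * (120 ^ (m-j) * gS a (m-j)) := by rw [ih (m-j) (by omega)]
        _ = ((Nat.choose (m+1) (j+1) : Nat) : Int) * PySem.List.pyGetD a ((j:Int)+1) 0
              * (PySem.List.pyGetD scB (j:Int) 0 * ((Nat.factorial (j+1) : Nat) : Int))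
              * (120 ^ (m-j) * gS a (m-j)) := by unfold wgtB; ring
        _ = ((Nat.choose (m+1) (j+1) : Nat) : Int) * PySem.List.pyGetD a ((j:Int)+1) 0
              * 120 ^ (j+1) * (120 ^ (m-j) * gS a (m-j)) := by rw [scB_fact j hj5]
        _ = 120 ^ (m+1) * (((Nat.choose (m+1) (j+1) : Nat) : Int)
              * PySem.List.pyGetD a ((j:Int)+1) 0 * gS a (m-j)) := by
              rw [show (120:Int) ^ (m+1) = 120 ^ (j+1) * 120 ^ (m-j) from by
                rw [← pow_add]; congr 1; omega]
              ring

-- the w list of the port is wgtB on range (min N 5)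
theorem wB_eq (N : Nat) :
    ∀ (a : List Int),
      (PySem.List.pyRange 1 ((if (N:Int) ≥ 5 then 5 else (N:Int))+1) 1).map
        (fun s => PySem.List.pyGetD a s 0 * PySem.List.pyGetD scB (s-1) 0)
      = (List.range (min N 5)).map (wgtB a) := by
  intro a
  have hk : (if (N:Int) ≥ 5 then (5:Int) else (N:Int)) = ((min N 5 : Nat) : Int) := by
    split_ifs with h <;> push_cast <;> omega
  rw [hk, PySem.List.pyRange_one, show (((min N 5 : Nat) : Int)+1-1).toNat = min N 5 by omega,
    List.map_map]
  apply List.map_congr_left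
  intro j _
  simp only [Function.comp, wgtB]
  rw [add_comm (1:Int) (j:Int), show (j:Int)+1-1 = (j:Int) from by ring]

theorem wB_get (a : List Int) (N j : Nat) (hj : j < min N 5) :
    PySem.List.pyGetD ((List.range (min N 5)).map (wgtB a)) ((j:Int)) 0 = wgtB a j := by
  rw [PySem.List.pyGetD_natCast, List.getD_eq_getElem?_getD]
  simp [hj]

def pListB (a : List Int) (k : Nat) : List Int := (List.range (k+1)).map (pS a)

theorem pListB_get (a : List Int) (k i : Nat) (hi : i ≤ k) :
    PySem.List.pyGetD (pListB a k) (i : Int) 0 = pS a i := by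
  unfold pListB
  rw [PySem.List.pyGetD_natCast, List.getD_eq_getElem?_getD]
  simp [Nat.lt_succ_of_le hi]

theorem outerB (N : Nat) (a : List Int) :
    ∀ (k : Nat), k ≤ N →
      (PySem.List.pyRange 1 ((k : Int)+1) 1).foldl
        (pStepB ((List.range (min N 5)).map (wgtB a))) [1]
      = pListB a k := by
  intro k
  induction k with
  | zero =>
    intro _
    rw [PySem.List.pyRange_one_eq_nil (by omega)]
    simp [pListB, pS]
  | succ k ih =>
    intro hk1
    have hsplit : PySem.List.pyRange 1 (((k+1:Nat):Int)+1) 1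
        = PySem.List.pyRange 1 ((k:Int)+1) 1 ++ [(k:Int)+1] := by
      push_cast; exact PySem.List.pyRange_one_succ_right (by omega)
    rw [hsplit, List.foldl_append, ih (by omega), List.foldl_cons, List.foldl_nil]
    simp only [pStepB]
    have hupto : (if ((k:Int)+1) ≥ 5 then (5:Int) else (k:Int)+1) = ((min (k+1) 5 : Nat) : Int) := by
      split_ifs with h <;> push_cast <;> omega
    rw [hupto]
    rw [foldl_pyRange_add (min (k+1) 5)
      (fun s => PySem.List.pyGetD ((List.range (min N 5)).map (wgtB a)) (s-1) 0
        * PySem.List.pyGetD (pListB a k) ((k:Int)+1 - s) 0)]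
    have hterm : ((List.range (min (k+1) 5)).map (fun (j : Nat) =>
          PySem.List.pyGetD ((List.range (min N 5)).map (wgtB a)) (((j:Int)+1)-1) 0
            * PySem.List.pyGetD (pListB a k) ((k:Int)+1 - ((j:Int)+1)) 0))
        = ((List.range (min (k+1) 5)).map (fun (j : Nat) => wgtB a j * pS a (k - j))) := by
      apply List.map_congr_left
      intro j hj
      rw [List.mem_range] at hj
      rw [show ((j:Int)+1)-1 = (j:Int) from by ring, wB_get a N j (by omega)]
      rw [show ((k:Int)+1) - ((j:Int)+1) = ((k-j : Nat) : Int) from by omega]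
      rw [pListB_get a k (k-j) (by omega)]
    rw [hterm, ← pS_succ a k]
    unfold pListB
    rw [show List.range (k+1+1) = List.range (k+1) ++ [k+1] from List.range_succ, List.map_append]
    rfl

theorem factLoopB (N : Nat) :
    (PySem.List.pyRange 2 ((N:Int)+1) 1).foldl (fun f i => f * i) 1
      = ((Nat.factorial N : Nat) : Int) := by
  induction N with
  | zero => rw [PySem.List.pyRange_one_eq_nil (by omega)]; simp [Nat.factorial]
  | succ M ih =>
    rcases Nat.eq_zero_or_pos M with h | h
    · subst h
      rw [PySem.List.pyRange_one_eq_nil (by norm_num)]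
      simp [Nat.factorial]
    · have hsplit : PySem.List.pyRange 2 (((M+1 : Nat) : Int)+1) 1
          = PySem.List.pyRange 2 ((M:Int)+1) 1 ++ [(M:Int)+1] := by
        push_cast
        exact PySem.List.pyRange_one_succ_right (by omega)
      rw [hsplit, List.foldl_append, ih, List.foldl_cons, List.foldl_nil]
      rw [Nat.factorial_succ]
      push_cast
      ring

theorem A_eq_gS (N : Nat) (a : List Int) : G_exact (N : Int) a = gS a N := by
  simp only [G_exact]
  rw [show ((N:Int)+1).toNat = N+1 by omega]
  rw [outerA N a N le_rfl]
  rw [gListA_get a N N N le_rfl, if_pos le_rfl]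

theorem B_eq_gS (N : Nat) (a : List Int) : G_exact_alt (N : Int) a = gS a N := by
  simp only [G_exact_alt]
  rw [wB_eq N a, outerB N a N le_rfl, pListB_get a N N le_rfl, factLoopB N]
  rw [show ((N:Int)).toNat = N by omega]
  rw [pS_fact a N]
  rw [PySem.Int.floordiv_eq_ediv_of_pos (by positivity)]
  exact Int.mul_ediv_cancel_left _ (by positivity)

-- ===== VERDICT (by name: the statement is the Claim_ definition above) =====
theorem G_exact_spec : Claim_equal_G_exact := by
  intro n a _ hpre
  obtain ⟨N, rfl⟩ := Int.eq_ofNat_of_zero_le hpre.1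
  unfold Spec_G_exact
  rw [A_eq_gS, B_eq_gS]
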